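-- pv_equiv track=rewrite | github.com/aliosmanoguz/ParselSorguBot | RotaAlg.py | divideLine
-- ===== SOURCE A (Python) =====
-- def selectionSort(arr, xORy):
--     if xORy == True:
--         dr = 0
--     else:
--         dr = 1
--
--     for i in range(len(arr) - 1):
--         min = i
--
--         for j in range(i + 1, len(arr)):
--             if arr[j][dr] < arr[min][dr]:
--                 min = j
--
--         if min != i:
--             arr[min], arr[i] = arr[i], arr[min]
--
--     return arr
--
-- def divideLine(allNodes, xORy):
--     if xORy == True:
--         dr = 0
--     else:
--         dr = 1
--
--     divided = list()
--     currentIndex = 0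
--     while currentIndex < len(allNodes):
--         arr = list()
--         match = allNodes[currentIndex][dr]
--         for node in allNodes:
--             if node[dr] == match:
--                 arr.append(node)
--                 currentIndex += 1
--
--         arr = selectionSort(arr, not xORy)
--         divided.append(arr)
--
--     return divided
-- ===== SOURCE B (Python) =====
-- def selectionSort(arr, xORy):
--     if xORy == True:
--         dr = 0
--     else:
--         dr = 1
--
--     for i in range(len(arr) - 1):
--         min = i
--
--         for j in range(i + 1, len(arr)):
--             if arr[j][dr] < arr[min][dr]:
--                 min = j
--
--         if min != i:
--             arr[min], arr[i] = arr[i], arr[min]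
--
--     return arr
--
-- def divideLine(allNodes, xORy):
--     dr = 0 if xORy == True else 1
--
--     # one linear pass: index every key to its members and their count
--     groups = {}
--     for node in allNodes:
--         groups.setdefault(node[dr], []).append(node)
--
--     divided = []
--     i = 0
--     n = len(allNodes)
--     while i < n:
--         members = groups[allNodes[i][dr]]
--         divided.append(selectionSort(list(members), not xORy))
--         i += len(members)
--     return divided
-- ===== Notes on version B (the rewrite author's own statement) =====
-- stated objective: faster
-- what changed: A rescans the entire node list once per emitted group to collect its members; B builds a dict keyed by the chosen coordinate in one linear pass and the while-loop just looks each run's group up and jumps over its size (selectionSort per group is kept unchanged).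
import Mathlib
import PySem

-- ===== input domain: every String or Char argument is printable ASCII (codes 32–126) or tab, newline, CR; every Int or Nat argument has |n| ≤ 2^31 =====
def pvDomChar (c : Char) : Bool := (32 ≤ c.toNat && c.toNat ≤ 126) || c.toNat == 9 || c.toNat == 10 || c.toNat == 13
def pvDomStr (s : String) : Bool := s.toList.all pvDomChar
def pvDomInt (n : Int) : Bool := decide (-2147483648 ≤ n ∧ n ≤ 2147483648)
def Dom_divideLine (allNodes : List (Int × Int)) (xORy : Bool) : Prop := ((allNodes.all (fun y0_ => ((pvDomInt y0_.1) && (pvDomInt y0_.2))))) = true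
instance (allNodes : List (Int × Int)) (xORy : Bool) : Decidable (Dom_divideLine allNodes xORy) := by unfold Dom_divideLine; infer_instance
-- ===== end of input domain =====

-- B replaces A's per-group rescans of the whole list by one dict-building pass (groups indexed by
-- the chosen coordinate), keeping the same selectionSort for each group; return values are equal on
-- every input (A mutates only lists it allocates itself, so no observable side effects either way).

-- ===== PORT A =====
-- node[dr]: the programs only ever use dr = 0 or dr = 1, where this is exact
def pyNth (p : Int × Int) (dr : Int) : Int := if dr = 0 then p.1 else p.2

-- literal port of selectionSort (index loops over pyRange; the in-place swap becomes two pySetD;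
-- all indices produced by the loops are in range, so the pyGetD defaults are never read)
def selectionSort (arr : List (Int × Int)) (xORy : Bool) : List (Int × Int) :=
  let dr : Int := if xORy = true then 0 else 1
  (PySem.List.pyRange 0 ((arr.length : Int) - 1) 1).foldl
    (fun arr i =>
      let min := (PySem.List.pyRange (i + 1) (arr.length : Int) 1).foldl
        (fun min j =>
          if pyNth (PySem.List.pyGetD arr j (0, 0)) dr < pyNth (PySem.List.pyGetD arr min (0, 0)) dr
          then j else min)
        i
      if min ≠ i then
        PySem.List.pySetD (PySem.List.pySetD arr min (PySem.List.pyGetD arr i (0, 0))) i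
          (PySem.List.pyGetD arr min (0, 0))
      else arr)
    arr

-- the inner 'for node in allNodes' of A: appends the matching nodes and advances currentIndex
theorem dlFoldA (dr m : Int) (l : List (Int × Int)) (a : List (Int × Int)) (c : Nat) :
    l.foldl
      (fun (s : List (Int × Int) × Nat) node =>
        if pyNth node dr = m then (s.1 ++ [node], s.2 + 1) else s) (a, c)
    = (a ++ l.filter (fun node => pyNth node dr == m),
       c + (l.filter (fun node => pyNth node dr == m)).length) := by
  induction l generalizing a c with
  | nil => simp
  | cons x t ih =>
      by_cases h : pyNth x dr = m
      · simp [List.foldl_cons, h, ih]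
        omega
      · simp [List.foldl_cons, h, ih]

theorem filterSelfPos (dr : Int) (l : List (Int × Int)) (i : Nat) (h : i < l.length) :
    0 < (l.filter (fun node => pyNth node dr == pyNth l[i] dr)).length := by
  have hm : l[i] ∈ l.filter (fun node => pyNth node dr == pyNth l[i] dr) :=
    List.mem_filter.2 ⟨List.getElem_mem h, by simp⟩
  exact List.length_pos_of_mem hm

-- the inner 'for node in allNodes' loop of A as a helper (state: the arr being built, currentIndex)
def dlScan (allNodes : List (Int × Int)) (dr m : Int) (ci : Nat) : List (Int × Int) × Nat :=
  allNodes.foldl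
    (fun (s : List (Int × Int) × Nat) node =>
      if pyNth node dr = m then (s.1 ++ [node], s.2 + 1) else s)
    (([] : List (Int × Int)), ci)

theorem dlScan_eq (allNodes : List (Int × Int)) (dr m : Int) (ci : Nat) :
    dlScan allNodes dr m ci
      = (allNodes.filter (fun node => pyNth node dr == m),
         ci + (allNodes.filter (fun node => pyNth node dr == m)).length) := by
  simp [dlScan, dlFoldA]

-- the while-loop of A: each pass rescans ALL of allNodes for the key at currentIndex
def dlGoA (allNodes : List (Int × Int)) (dr : Int) (xORy : Bool) (ci : Nat) :
    List (List (Int × Int)) :=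
  if h : ci < allNodes.length then
    let st := dlScan allNodes dr (pyNth allNodes[ci] dr) ci
    selectionSort st.1 (!xORy) :: dlGoA allNodes dr xORy st.2
  else []
termination_by allNodes.length - ci
decreasing_by
  rw [dlScan_eq]
  have := filterSelfPos dr allNodes ci h
  omega

def divideLine (allNodes : List (Int × Int)) (xORy : Bool) : List (List (Int × Int)) :=
  let dr : Int := if xORy = true then 0 else 1
  dlGoA allNodes dr xORy 0

-- ===== PORT B =====
-- groups.setdefault(node[dr], []).append(node): through lookups this is exactly an insert of the
-- appended list (Dict.insert overwrites in place, new keys append — Python dict semantics)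
def buildGroups (allNodes : List (Int × Int)) (dr : Int) : PySem.Dict Int (List (Int × Int)) :=
  allNodes.foldl
    (fun g node => g.insert (pyNth node dr) (g.getD (pyNth node dr) [] ++ [node]))
    PySem.Dict.empty

theorem buildGroups_getD_aux (dr k : Int) (l : List (Int × Int))
    (g : PySem.Dict Int (List (Int × Int))) :
    (l.foldl (fun g node => g.insert (pyNth node dr) (g.getD (pyNth node dr) [] ++ [node])) g).getD k []
    = g.getD k [] ++ l.filter (fun node => pyNth node dr == k) := by
  induction l generalizing g with
  | nil => simp
  | cons x t ih =>
      by_cases h : pyNth x dr = k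
      · simp [List.foldl_cons, ih, h]
      · have h' : ¬ k = pyNth x dr := fun hh => h hh.symm
        simp [List.foldl_cons, ih, PySem.Dict.getD_insert, h, h']

theorem buildGroups_getD (dr k : Int) (l : List (Int × Int)) :
    (buildGroups l dr).getD k [] = l.filter (fun node => pyNth node dr == k) := by
  simp [buildGroups, buildGroups_getD_aux]

-- the while-loop of B: look the run's group up, emit its sorted copy, jump over its whole size
-- (the 'hg' hypothesis only justifies termination — the loop advances by the group's size ≥ 1)
def dlGoB (allNodes : List (Int × Int)) (dr : Int) (xORy : Bool)
    (groups : PySem.Dict Int (List (Int × Int))) (hg : groups = buildGroups allNodes dr)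
    (ci : Nat) : List (List (Int × Int)) :=
  if h : ci < allNodes.length then
    let members := groups.getD (pyNth allNodes[ci] dr) []
    selectionSort members (!xORy) :: dlGoB allNodes dr xORy groups hg (ci + members.length)
  else []
termination_by allNodes.length - ci
decreasing_by
  subst hg
  simp only [buildGroups_getD]
  have := filterSelfPos dr allNodes ci h
  omega

def divideLine_alt (allNodes : List (Int × Int)) (xORy : Bool) : List (List (Int × Int)) :=
  let dr : Int := if xORy = true then 0 else 1
  dlGoB allNodes dr xORy (buildGroups allNodes dr) rfl 0

-- ===== PRECONDITION & SPEC =====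
def Spec_divideLine (allNodes : List (Int × Int)) (xORy : Bool) (out : List (List (Int × Int))) : Prop := out = divideLine_alt allNodes xORy
instance (allNodes : List (Int × Int)) (xORy : Bool) (out : List (List (Int × Int))) : Decidable (Spec_divideLine allNodes xORy out) := by unfold Spec_divideLine; infer_instance

-- ===== CLAIM (what is proved, stated in full; the proofs are below) =====
def Claim_equal_divideLine : Prop := ∀ (allNodes : List (Int × Int)) (xORy : Bool), Dom_divideLine allNodes xORy → Spec_divideLine allNodes xORy (divideLine allNodes xORy)

-- ===== LEMMAS AND PROOFS =====
theorem go_eq (allNodes : List (Int × Int)) (dr : Int) (xORy : Bool) :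
    ∀ (n ci : Nat), allNodes.length - ci ≤ n →
      dlGoA allNodes dr xORy ci
        = dlGoB allNodes dr xORy (buildGroups allNodes dr) rfl ci := by
  intro n
  induction n with
  | zero =>
      intro ci hci
      rw [dlGoA.eq_def, dlGoB.eq_def, dif_neg (by omega), dif_neg (by omega)]
  | succ n ih =>
      intro ci hci
      rw [dlGoA.eq_def, dlGoB.eq_def]
      by_cases h : ci < allNodes.length
      · simp only [dif_pos h, dlScan_eq, buildGroups_getD]
        have hpos := filterSelfPos dr allNodes ci h
        congr 1
        exact ih _ (by omega)
      · rw [dif_neg h, dif_neg h]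

-- ===== VERDICT (by name: the statement is the Claim_ definition above) =====
theorem divideLine_spec : Claim_equal_divideLine := by
  intro allNodes xORy _
  show divideLine allNodes xORy = divideLine_alt allNodes xORy
  simp only [divideLine, divideLine_alt]
  exact go_eq allNodes _ xORy allNodes.length 0 (by omega)
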